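-- pv_equiv track=rewrite | github.com/Emasoft/emasoft-chief-of-staff | scripts/ecos_stop_check.py | check_pending_tasks
-- ===== SOURCE A (Python) =====
-- def check_pending_tasks(content: str) -> tuple[int, list[str]]:
--     """Check for pending tasks in state file.
--
--     Args:
--         content: State file content
--
--     Returns:
--         Tuple of (count, list of task descriptions)
--     """
--     tasks: list[str] = []
--
--     in_section = False
--     for line in content.split("\n"):
--         if "## Pending Tasks" in line:
--             in_section = True
--             continue
--         if in_section:
--             if line.startswith("##"):
--                 break
--             if line.strip().startswith("-"):
--                 task = line.strip().lstrip("-").strip()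
--                 if task and "No pending tasks" not in task:
--                     tasks.append(task[:80])
--
--     return len(tasks), tasks
-- ===== SOURCE B (Python) =====
-- HEADER = "## Pending Tasks"
--
--
-- def check_pending_tasks(content: str) -> tuple[int, list[str]]:
--     """Check for pending tasks in state file.
--
--     Works on the raw string: locate the header occurrence with str.find,
--     slice off the remainder of the header line at its first newline, cut the
--     section at the first "\n##" (a following line that starts with "##"),
--     and only then split the isolated section into lines.
--     """
--     i = content.find(HEADER)
--     if i == -1:
--         return 0, []
--     rest = content[i + len(HEADER):]
--     nl = rest.find("\n")
--     if nl == -1: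
--         return 0, []
--     rest = rest[nl:]                 # "\n" + everything after the header line
--     k = rest.find("\n##")            # k == 0 when the very next line starts with "##"
--     section = rest[1:] if k == -1 else rest[1:k]
--     stripped = [r.strip() for r in section.split("\n")]
--     dashed = [s.lstrip("-").strip() for s in stripped if s.startswith("-")]
--     tasks = [t[:80] for t in dashed if t and "No pending tasks" not in t]
--     return len(tasks), tasks
-- ===== Notes on version B (the rewrite author's own statement) =====
-- stated objective: alternative
-- what changed: A scans every line with an in_section flag; B never iterates over lines to locate the section: it works on the raw string with str.find and slicing (find the header occurrence, cut the header line at its first newline, cut the section at the first '\n##') and only splits the isolated section into lines for the strip/filter passes; Pre_ excludes content where more than one line contains '## Pending Tasks', a duplicate-header corner on which A's keep-scanning and B's stop-at-any-'##' readings are both defensible.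
-- outside the precondition, e.g. on check_pending_tasks('## Pending Tasks\n## Pending Tasks\n- a'): A returns (1, ['a']), B returns (0, [])
import Mathlib
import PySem

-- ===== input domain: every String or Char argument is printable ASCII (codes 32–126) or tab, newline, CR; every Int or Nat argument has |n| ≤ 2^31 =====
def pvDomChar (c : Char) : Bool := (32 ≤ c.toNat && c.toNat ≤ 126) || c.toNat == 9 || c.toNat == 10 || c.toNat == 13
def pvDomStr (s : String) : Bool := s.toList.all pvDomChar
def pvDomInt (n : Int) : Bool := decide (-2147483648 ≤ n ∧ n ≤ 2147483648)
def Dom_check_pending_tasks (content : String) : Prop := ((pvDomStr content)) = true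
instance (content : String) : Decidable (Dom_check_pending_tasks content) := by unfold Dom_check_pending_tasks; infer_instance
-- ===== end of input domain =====

-- B works on the raw string with find/slices (locate the header, cut the header line at its
-- newline, cut the section at the first "\n##") and only splits the isolated section into
-- lines; A scans all lines with an in_section flag (objective: alternative).

-- line.lstrip("-"): drop leading '-' characters — exact hand port of lstrip with a one-char set
def pvLstripDash (s : String) : String := String.ofList (s.toList.dropWhile (fun c => c == '-'))

-- ===== PORT A =====
-- the for-loop of A over the remaining lines, carrying (in_section, tasks)
def pvALoop : List String → Bool → List String → List String
  | [], _, acc => acc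
  | line :: rest, inSection, acc =>
    if PySem.Str.isIn "## Pending Tasks" line then pvALoop rest true acc
    else if inSection then
      if PySem.Str.startswith line "##" then acc  -- break
      else if PySem.Str.startswith (PySem.Str.strip line) "-" then
        let task := PySem.Str.strip (pvLstripDash (PySem.Str.strip line))
        if !(task == "") && !(PySem.Str.isIn "No pending tasks" task) then
          pvALoop rest inSection (acc ++ [PySem.Str.slice task none (some 80)])
        else pvALoop rest inSection acc
      else pvALoop rest inSection acc
    else pvALoop rest false acc

def check_pending_tasks (content : String) : Int × List String :=
  let tasks := pvALoop ((PySem.Str.split? content "\n").getD []) false []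
  ((tasks.length : Int), tasks)

-- ===== PORT B =====
def check_pending_tasks_alt (content : String) : Int × List String :=
  let i := PySem.Str.find content "## Pending Tasks"
  if i == -1 then (0, [])
  else
    let rest := PySem.Str.slice content (some (i + PySem.Str.len "## Pending Tasks")) none
    let nl := PySem.Str.find rest "\n"
    if nl == -1 then (0, [])
    else
      let rest2 := PySem.Str.slice rest (some nl) none   -- "\n" + everything after the header line
      let k := PySem.Str.find rest2 "\n##"
      let sectionStr := if k == -1 then PySem.Str.slice rest2 (some 1) none
                        else PySem.Str.slice rest2 (some 1) (some k)
      let stripped := ((PySem.Str.split? sectionStr "\n").getD []).map PySem.Str.strip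
      let dashed := (stripped.filter (fun s => PySem.Str.startswith s "-")).map
        (fun s => PySem.Str.strip (pvLstripDash s))
      let tasks := (dashed.filter
          (fun t => !(t == "") && !(PySem.Str.isIn "No pending tasks" t))).map
        (fun t => PySem.Str.slice t none (some 80))
      ((tasks.length : Int), tasks)

-- ===== PRECONDITION & SPEC =====
-- Pre_ excludes content in which more than one line contains the header "## Pending Tasks":
-- duplicate section headers are a corner no caller specifies — A skips repeated header lines and
-- keeps scanning the section, B ends the section at the next "##" line; either reading is defensible.
def Pre_check_pending_tasks (content : String) : Prop :=
  (((PySem.Str.split? content "\n").getD []).countP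
    (fun l => PySem.Str.isIn "## Pending Tasks" l)) ≤ 1

instance (content : String) : Decidable (Pre_check_pending_tasks content) := by
  unfold Pre_check_pending_tasks; infer_instance

def pvWitness_check_pending_tasks : String :=
  "## Pending Tasks\n- alpha\n-  beta task\n\n## Done"

def Spec_check_pending_tasks (content : String) (out : Int × List String) : Prop :=
  out = check_pending_tasks_alt content
instance (content : String) (out : Int × List String) : Decidable (Spec_check_pending_tasks content out) := by
  unfold Spec_check_pending_tasks; infer_instance

-- ===== CLAIM (what is proved, stated in full; the proofs are below) =====
def Claim_equal_check_pending_tasks : Prop := ∀ (content : String), Dom_check_pending_tasks content → Pre_check_pending_tasks content → Spec_check_pending_tasks content (check_pending_tasks content)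

-- ===== LEMMAS AND PROOFS =====

-- ---------- proof-side helpers on lines ----------

-- Python's split("\n") as a structural recursion over the characters
def pvLines : List Char → List (List Char)
  | [] => [[]]
  | c :: rest =>
    if c = '\n' then [] :: pvLines rest
    else
      match pvLines rest with
      | [] => [[c]]
      | l :: ls => (c :: l) :: ls

-- prepend a prefix onto the first piece
def pvConsHead (p : List Char) : List (List Char) → List (List Char)
  | [] => [p]
  | l :: ls => (p ++ l) :: ls

-- first index of a line containing the header, on char lines
def pvFindHeaderC : List (List Char) → Option Nat
  | [] => none
  | l :: rest =>
    if PySem.Chars.isIn "## Pending Tasks".toList l then some 0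
    else (pvFindHeaderC rest).map (· + 1)

-- section body on char lines: lines up to (excluding) the next "##" line
def pvTakeBodyC : List (List Char) → List (List Char)
  | [] => []
  | l :: rest =>
    if PySem.Chars.startswith l "##".toList then [] else l :: pvTakeBodyC rest

-- per-line contribution of a body line to the task list
def pvLineTasks (line : String) : List String :=
  let s := PySem.Str.strip line
  if PySem.Str.startswith s "-" then
    let task := PySem.Str.strip (pvLstripDash s)
    if !(task == "") && !(PySem.Str.isIn "No pending tasks" task) then
      [PySem.Str.slice task none (some 80)]
    else []
  else []

-- ---------- split("\n") = pvLines ----------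

theorem pvLines_ne_nil (cs : List Char) : pvLines cs ≠ [] := by
  cases cs with
  | nil => simp [pvLines]
  | cons c rest =>
    simp only [pvLines]
    split
    · simp
    · cases h : pvLines rest <;> simp

theorem pv_splitOn_go (fuel : Nat) (l cur : List Char) (acc : List (List Char))
    (hf : l.length ≤ fuel) :
    PySem.Chars.splitOn.go ['\n'] fuel l cur acc
      = acc.reverse ++ pvConsHead cur.reverse (pvLines l) := by
  induction fuel generalizing l cur acc with
  | zero =>
    have : l = [] := List.length_eq_zero_iff.mp (Nat.le_zero.mp hf)
    subst this
    simp [PySem.Chars.splitOn.go, pvLines, pvConsHead]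
  | succ fuel ih =>
    cases l with
    | nil => simp [PySem.Chars.splitOn.go, pvLines, pvConsHead]
    | cons c rest =>
      rw [PySem.Chars.splitOn.go.eq_def]
      simp only []
      by_cases hc : c = '\n'
      · subst hc
        rw [if_pos (by simp [List.isPrefixOf])]
        have hdrop : List.drop ['\n'].length ('\n' :: rest) = rest := by simp
        rw [hdrop, ih rest [] (cur.reverse :: acc) (by simpa using Nat.le_of_succ_le_succ hf)]
        have hne := pvLines_ne_nil rest
        cases hl : pvLines rest with
        | nil => exact absurd hl hne
        | cons l0 ls => simp [pvLines, pvConsHead, hl]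
      · rw [if_neg (by simp [List.isPrefixOf]; exact fun hh => hc hh.symm)]
        rw [ih rest (c :: cur) acc (by simpa using Nat.le_of_succ_le_succ hf)]
        have hne := pvLines_ne_nil rest
        cases hl : pvLines rest with
        | nil => exact absurd hl hne
        | cons l0 ls => simp [pvLines, pvConsHead, hl, hc]

theorem pv_splitOn_eq (cs : List Char) :
    PySem.Chars.splitOn cs ['\n'] = pvLines cs := by
  have h := pv_splitOn_go (cs.length + 1) cs [] [] (by omega)
  simpa [PySem.Chars.splitOn, pvConsHead] using
    h.trans (by
      have hne := pvLines_ne_nil cs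
      cases hl : pvLines cs with
      | nil => exact absurd hl hne
      | cons l0 ls => simp [pvConsHead])

-- the String-level lines of any string are pvLines of its characters
theorem pv_lines_eq (s : String) :
    (PySem.Str.split? s "\n").getD [] = (pvLines s.toList).map String.ofList := by
  rw [PySem.Str.split?.eq_1]
  have : PySem.Chars.split? s.toList "\n".toList
      = some (PySem.Chars.splitOn s.toList ['\n']) := by
    rw [PySem.Chars.split?.eq_1]
    have h1 : ("\n".toList).isEmpty = false := by decide
    have h2 : "\n".toList = ['\n'] := by decide
    rw [h1, h2]
    simp
  rw [this]
  simp [pv_splitOn_eq]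

theorem pvLines_no_nl (cs : List Char) : ∀ l ∈ pvLines cs, '\n' ∉ l := by
  induction cs with
  | nil => simp [pvLines]
  | cons c rest ih =>
    simp only [pvLines]
    by_cases hc : c = '\n'
    · simp only [hc]
      intro l hl
      rcases List.mem_cons.mp hl with hl | hl
      · simp [hl]
      · exact ih l hl
    · rw [if_neg hc]
      have hne := pvLines_ne_nil rest
      cases hl : pvLines rest with
      | nil => exact absurd hl hne
      | cons l0 ls =>
        intro l hml
        rcases List.mem_cons.mp hml with hml | hml
        · subst hml
          have h0 : '\n' ∉ l0 := ih l0 (by rw [hl]; simp)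
          intro hmem
          rcases List.mem_cons.mp hmem with h | h
          · exact hc h.symm
          · exact h0 h
        · exact ih l (by rw [hl]; simp [hml])

theorem pvLines_no_newline (cs : List Char) (h : '\n' ∉ cs) : pvLines cs = [cs] := by
  induction cs with
  | nil => simp [pvLines]
  | cons c rest ih =>
    have hc : c ≠ '\n' := fun hh => h (by simp [hh])
    have hr : '\n' ∉ rest := fun hh => h (by simp [hh])
    simp [pvLines, hc, ih hr]

theorem pvLines_append (l r : List Char) (h : '\n' ∉ l) :
    pvLines (l ++ '\n' :: r) = l :: pvLines r := by
  induction l with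
  | nil => simp [pvLines]
  | cons c l' ih =>
    have hc : c ≠ '\n' := fun hh => h (by simp [hh])
    have hl' : '\n' ∉ l' := fun hh => h (by simp [hh])
    simp [pvLines, hc, ih hl']

theorem pv_decomp (cs : List Char) :
    '\n' ∉ cs ∨ ∃ l r, cs = l ++ '\n' :: r ∧ '\n' ∉ l := by
  by_cases h : '\n' ∈ cs
  · right
    have hd : cs.dropWhile (· ≠ '\n') ≠ [] := by
      intro he
      have := List.dropWhile_eq_nil_iff.mp he '\n' h
      simp at this
    have hh : (cs.dropWhile (· ≠ '\n')).head hd = '\n' := by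
      have := List.head_dropWhile_not (fun x => decide (x ≠ '\n')) hd
      simpa using this
    refine ⟨cs.takeWhile (· ≠ '\n'), (cs.dropWhile (· ≠ '\n')).tail, ?_, ?_⟩
    · conv_lhs => rw [← List.takeWhile_append_dropWhile (p := (· ≠ '\n')) (l := cs)]
      congr 1
      have h3 := List.cons_head_tail hd
      rw [hh] at h3
      exact h3.symm
    · intro hm
      have := List.mem_takeWhile_imp hm
      simp at this
  · left; exact h

theorem pv_find_eq_of (cs sub : List Char) (i : Nat) (_hi : i ≤ cs.length)
    (hpre : sub <+: cs.drop i) (hmin : ∀ j < i, ¬ sub <+: cs.drop j) :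
    PySem.Chars.find cs sub = (i : Int) := by
  have hinf : sub <:+: cs := hpre.isInfix.trans (List.drop_suffix i cs).isInfix
  have hnn : 0 ≤ PySem.Chars.find cs sub := (PySem.Chars.find_nonneg_iff cs sub).mpr hinf
  obtain ⟨hp, hm⟩ := PySem.Chars.find_spec hnn
  rcases lt_trichotomy (PySem.Chars.find cs sub).toNat i with h | h | h
  · exact absurd hp (hmin _ h)
  · omega
  · exact absurd hpre (hm i h)

theorem pv_prefix_through (sub l r : List Char) (h : '\n' ∉ sub) :
    sub <+: l ++ '\n' :: r ↔ sub <+: l := by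
  induction sub generalizing l with
  | nil => simp
  | cons a sub' ih =>
    have ha : a ≠ '\n' := fun hh => h (by simp [hh])
    have hs' : '\n' ∉ sub' := fun hh => h (by simp [hh])
    cases l with
    | nil =>
      simp only [List.nil_append]
      constructor
      · intro hp
        exact absurd (List.cons_prefix_cons.mp hp).1 ha
      · intro hp
        exact absurd hp (by simp)
    | cons b l' =>
      rw [List.cons_append, List.cons_prefix_cons, List.cons_prefix_cons, ih l' hs']

theorem pv_infix_split (sub l r : List Char) (h : '\n' ∉ sub) (hne : sub ≠ []) :
    sub <:+: l ++ '\n' :: r ↔ sub <:+: l ∨ sub <:+: r := by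
  induction l with
  | nil =>
    simp only [List.nil_append]
    rw [List.infix_cons_iff]
    constructor
    · rintro (hp | hi)
      · cases sub with
        | nil => exact absurd rfl hne
        | cons a sub' =>
          exact absurd (List.cons_prefix_cons.mp hp).1 (fun hh => h (by simp [hh]))
      · exact Or.inr hi
    · rintro (hl | hr)
      · exact absurd (List.infix_nil.mp hl) hne
      · exact Or.inr hr
  | cons c l' ih =>
    rw [List.cons_append, List.infix_cons_iff, List.infix_cons_iff]
    constructor
    · rintro (hp | hi)
      · exact Or.inl (Or.inl ((pv_prefix_through sub (c :: l') r h).mp hp))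
      · rcases ih.mp hi with h1 | h2
        · exact Or.inl (Or.inr h1)
        · exact Or.inr h2
    · rintro ((hp | hi) | hr)
      · left
        exact (pv_prefix_through sub (c :: l') r h).mpr hp
      · right; exact ih.mpr (Or.inl hi)
      · right; exact ih.mpr (Or.inr hr)


-- round trip: joining '\n'-free lines and re-splitting gives them back
theorem pv_join_lines (L : List (List Char)) (hL : ∀ l ∈ L, '\n' ∉ l) (hne : L ≠ []) :
    pvLines (PySem.Chars.join ['\n'] L) = L := by
  induction L with
  | nil => exact absurd rfl hne
  | cons l rest ih =>
    cases rest with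
    | nil => simp [PySem.Chars.join_singleton, pvLines_no_newline l (hL l (by simp))]
    | cons l2 rest' =>
      rw [PySem.Chars.join_cons_cons]
      have hj : l ++ ['\n'] ++ PySem.Chars.join ['\n'] (l2 :: rest')
          = l ++ '\n' :: PySem.Chars.join ['\n'] (l2 :: rest') := by simp
      rw [hj, pvLines_append _ _ (hL l (by simp)),
        ih (fun x hx => hL x (by simp [hx])) (by simp)]

-- ---------- computed find values ----------

theorem pv_find_append (sub l r : List Char) (h0 : '\n' ∉ sub) (hne : sub ≠ []) :
    PySem.Chars.find (l ++ '\n' :: r) sub =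
      if 0 ≤ PySem.Chars.find l sub then PySem.Chars.find l sub
      else if 0 ≤ PySem.Chars.find r sub then (l.length : Int) + 1 + PySem.Chars.find r sub
      else -1 := by
  by_cases h1 : 0 ≤ PySem.Chars.find l sub
  · rw [if_pos h1]
    obtain ⟨hp, hm⟩ := PySem.Chars.find_spec h1
    have hle : (PySem.Chars.find l sub).toNat ≤ l.length := by
      have := PySem.Chars.find_le_length l sub; omega
    have := pv_find_eq_of (l ++ '\n' :: r) sub (PySem.Chars.find l sub).toNat
      (by simp; omega)
      (by rw [List.drop_append_of_le_length hle]
          exact (pv_prefix_through sub _ r h0).mpr hp)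
      (by intro j hj hpre
          rw [List.drop_append_of_le_length (by omega)] at hpre
          exact hm j hj ((pv_prefix_through sub _ r h0).mp hpre))
    rw [this, Int.toNat_of_nonneg h1]
  · rw [if_neg h1]
    have hl1 : ¬ sub <:+: l := by
      intro hh
      exact h1 ((PySem.Chars.find_nonneg_iff l sub).mpr hh)
    by_cases h2 : 0 ≤ PySem.Chars.find r sub
    · rw [if_pos h2]
      obtain ⟨hp, hm⟩ := PySem.Chars.find_spec h2
      have hler : (PySem.Chars.find r sub).toNat ≤ r.length := by
        have := PySem.Chars.find_le_length r sub; omega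
      have := pv_find_eq_of (l ++ '\n' :: r) sub (l.length + 1 + (PySem.Chars.find r sub).toNat)
        (by simp; omega)
        (by have heq : l.length + 1 + (PySem.Chars.find r sub).toNat
              = l.length + (1 + (PySem.Chars.find r sub).toNat) := by omega
            rw [heq, List.drop_length_add_append]
            have hds : List.drop (1 + (PySem.Chars.find r sub).toNat) ('\n' :: r)
                = List.drop (PySem.Chars.find r sub).toNat r := by
              rw [Nat.add_comm]; simp
            rw [hds]; exact hp)
        (by intro j hj hpre
            by_cases hjl : j ≤ l.length
            · rw [List.drop_append_of_le_length hjl] at hpre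
              have := (pv_prefix_through sub _ r h0).mp hpre
              exact hl1 (this.isInfix.trans (List.drop_suffix j l).isInfix)
            · have hj' : j = l.length + (1 + (j - l.length - 1)) := by omega
              rw [hj', List.drop_length_add_append] at hpre
              have hds : List.drop (1 + (j - l.length - 1)) ('\n' :: r)
                  = List.drop (j - l.length - 1) r := by
                rw [Nat.add_comm]; simp
              rw [hds] at hpre
              exact hm (j - l.length - 1) (by omega) hpre)
      rw [this]
      push_cast [Int.toNat_of_nonneg h2]
      ring
    · rw [if_neg h2]
      rw [PySem.Chars.find_eq_neg_one_iff]
      rw [pv_infix_split sub l r h0 hne]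
      rintro (hh | hh)
      · exact hl1 hh
      · exact h2 ((PySem.Chars.find_nonneg_iff r sub).mpr hh)

theorem pv_find_nl (d r : List Char) (hd : '\n' ∉ d) :
    PySem.Chars.find (d ++ '\n' :: r) ['\n'] = (d.length : Int) := by
  apply pv_find_eq_of
  · simp
  · rw [List.drop_left]
    exact ⟨r, rfl⟩
  · intro j hj hpre
    rw [List.drop_append_of_le_length (by omega)] at hpre
    cases hdj : d.drop j with
    | nil =>
      have := congrArg List.length hdj
      simp at this; omega
    | cons c d2 =>
      rw [hdj, List.cons_append] at hpre
      have hc := (List.cons_prefix_cons.mp hpre).1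
      exact hd (List.mem_of_mem_drop (by rw [hdj, ← hc]; simp))

theorem pv_find_nl_none (s : List Char) (hs : '\n' ∉ s) :
    PySem.Chars.find s ['\n'] = -1 := by
  rw [PySem.Chars.find_eq_neg_one_iff]
  intro hh
  exact hs ((List.singleton_infix_iff '\n' s).mp hh)


-- ---------- the "\n##" cut ----------

theorem pv_outer_eq (l t : List Char) :
    '\n' :: (l ++ '\n' :: t) = ('\n' :: l) ++ ('\n' :: t) := by simp

theorem pv_nhh_not_mid (l t : List Char) (hl : '\n' ∉ l) (hss : ¬ ['#','#'] <+: l) :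
    ∀ j, j ≤ l.length → ¬ (['\n','#','#'] <+: List.drop j (('\n' :: l) ++ ('\n' :: t))) := by
  intro j hj hpre
  cases j with
  | zero =>
    rw [List.drop_zero, ← pv_outer_eq] at hpre
    have := (List.cons_prefix_cons.mp hpre).2
    exact hss ((pv_prefix_through _ l t (by decide)).mp this)
  | succ j' =>
    rw [List.drop_append_of_le_length (by simp; omega)] at hpre
    have hdj : List.drop (j' + 1) ('\n' :: l) = List.drop j' l := by simp
    rw [hdj] at hpre
    cases hdl : l.drop j' with
    | nil =>
      have := congrArg List.length hdl
      simp at this; omega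
    | cons c d2 =>
      rw [hdl, List.cons_append] at hpre
      have hc := (List.cons_prefix_cons.mp hpre).1
      exact hl (List.mem_of_mem_drop (by rw [hdl, ← hc]; simp))

theorem pv_find_nhh_zero (t : List Char) (h : ['#','#'] <+: t) :
    PySem.Chars.find ('\n' :: t) ['\n','#','#'] = 0 := by
  apply pv_find_eq_of _ _ 0 (by simp)
  · rw [List.drop_zero]
    exact List.cons_prefix_cons.mpr ⟨rfl, h⟩
  · omega

theorem pv_find_nhh_single (t : List Char) (ht : '\n' ∉ t) (hss : ¬ ['#','#'] <+: t) :
    PySem.Chars.find ('\n' :: t) ['\n','#','#'] = -1 := by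
  rw [PySem.Chars.find_eq_neg_one_iff]
  intro hh
  rcases List.infix_cons_iff.mp hh with hp | hi
  · exact hss (List.cons_prefix_cons.mp hp).2
  · exact ht (hi.subset (by simp))

theorem pv_find_nhh_cons (l t : List Char) (hl : '\n' ∉ l) (hss : ¬ ['#','#'] <+: l) :
    PySem.Chars.find ('\n' :: (l ++ '\n' :: t)) ['\n','#','#'] =
      if 0 ≤ PySem.Chars.find ('\n' :: t) ['\n','#','#'] then
        ((l.length : Int) + 1) + PySem.Chars.find ('\n' :: t) ['\n','#','#']
      else -1 := by
  by_cases h2 : 0 ≤ PySem.Chars.find ('\n' :: t) ['\n','#','#']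
  · rw [if_pos h2]
    obtain ⟨hp, hm⟩ := PySem.Chars.find_spec h2
    have hle : (PySem.Chars.find ('\n' :: t) ['\n','#','#']).toNat ≤ ('\n' :: t).length := by
      have := PySem.Chars.find_le_length ('\n' :: t) ['\n','#','#']; omega
    rw [pv_outer_eq]
    have := pv_find_eq_of (('\n' :: l) ++ ('\n' :: t)) ['\n','#','#']
      ((l.length + 1) + (PySem.Chars.find ('\n' :: t) ['\n','#','#']).toNat)
      (by simp at hle ⊢; omega)
      (by have heq : l.length + 1 + (PySem.Chars.find ('\n' :: t) ['\n','#','#']).toNat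
            = ('\n' :: l).length + (PySem.Chars.find ('\n' :: t) ['\n','#','#']).toNat := by simp
          rw [heq, List.drop_length_add_append]
          exact hp)
      (by intro j hj hpre
          by_cases hjl : j ≤ l.length
          · exact pv_nhh_not_mid l t hl hss j hjl hpre
          · have hj' : j = ('\n' :: l).length + (j - l.length - 1) := by simp; omega
            rw [hj', List.drop_length_add_append] at hpre
            exact hm (j - l.length - 1) (by omega) hpre)
    rw [this]
    push_cast [Int.toNat_of_nonneg h2]
    ring
  · rw [if_neg h2]
    rw [PySem.Chars.find_eq_neg_one_iff]
    intro hh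
    have hin : PySem.Chars.isIn ['\n','#','#'] ('\n' :: (l ++ '\n' :: t)) = true :=
      (PySem.Chars.isIn_iff_infix _ _).mpr hh
    obtain ⟨j, hj⟩ := (PySem.Chars.exists_prefix_drop_iff_isIn _ _).mpr hin
    rw [pv_outer_eq] at hj
    by_cases hjl : j ≤ l.length
    · exact pv_nhh_not_mid l t hl hss j hjl hj
    · by_cases hjlen : j ≤ (('\n' :: l) ++ ('\n' :: t)).length
      · have hj' : j = ('\n' :: l).length + (j - l.length - 1) := by simp; omega
        rw [hj', List.drop_length_add_append] at hj
        have : ['\n','#','#'] <:+: ('\n' :: t) :=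
          hj.isInfix.trans (List.drop_suffix _ _).isInfix
        exact h2 ((PySem.Chars.find_nonneg_iff _ _).mpr this)
      · rw [List.drop_eq_nil_of_le (by omega)] at hj
        have := List.prefix_nil.mp hj
        simp at this


-- ---------- the section string is the joined body lines ----------

def pvSection (r : List Char) : List Char :=
  let k := PySem.Chars.find ('\n' :: r) ['\n','#','#']
  if k = -1 then r else List.take (k.toNat - 1) r

theorem pv_hh_toList : "##".toList = ['#','#'] := by decide

theorem pv_takebody_of_ss (t : List Char) (h : ['#','#'] <+: t) :
    pvTakeBodyC (pvLines t) = [] := by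
  rcases pv_decomp t with hn | ⟨l2, t2, rfl, hl2⟩
  · rw [pvLines_no_newline t hn]
    simp only [pvTakeBodyC]
    rw [if_pos (by rw [PySem.Chars.startswith_iff, pv_hh_toList]; exact h)]
  · rw [pvLines_append l2 t2 hl2]
    simp only [pvTakeBodyC]
    rw [if_pos (by
      rw [PySem.Chars.startswith_iff, pv_hh_toList]
      exact (pv_prefix_through _ l2 t2 (by decide)).mp h)]

theorem pv_takebody_of_not_ss (t : List Char) (h : ¬ ['#','#'] <+: t) :
    ∃ a L, pvTakeBodyC (pvLines t) = a :: L := by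
  rcases pv_decomp t with hn | ⟨l2, t2, rfl, hl2⟩
  · rw [pvLines_no_newline t hn]
    simp only [pvTakeBodyC]
    rw [if_neg (by rw [PySem.Chars.startswith_iff, pv_hh_toList]; exact h)]
    exact ⟨t, [], rfl⟩
  · rw [pvLines_append l2 t2 hl2]
    simp only [pvTakeBodyC]
    rw [if_neg (by
      rw [PySem.Chars.startswith_iff, pv_hh_toList]
      exact fun hp => h ((pv_prefix_through _ l2 t2 (by decide)).mpr hp))]
    exact ⟨l2, _, rfl⟩

theorem pv_section_eq (n : Nat) : ∀ (r : List Char), r.length ≤ n →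
    pvSection r = PySem.Chars.join ['\n'] (pvTakeBodyC (pvLines r)) := by
  induction n with
  | zero =>
    intro r hr
    have : r = [] := List.length_eq_zero_iff.mp (Nat.le_zero.mp hr)
    subst this
    decide
  | succ n ih =>
    intro r hr
    rcases pv_decomp r with hn | ⟨l, t, rfl, hl⟩
    · by_cases hss : ['#','#'] <+: r
      · rw [pvSection, pv_find_nhh_zero r hss, pv_takebody_of_ss r hss]
        simp [PySem.Chars.join_nil]
      · rw [pvSection, pv_find_nhh_single r hn hss, if_pos rfl,
          pvLines_no_newline r hn]
        simp only [pvTakeBodyC]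
        rw [if_neg (by rw [PySem.Chars.startswith_iff, pv_hh_toList]; exact hss),
          PySem.Chars.join_singleton]
    · have hlen : t.length ≤ n := by
        have := congrArg List.length (rfl : l ++ '\n' :: t = l ++ '\n' :: t)
        simp only [List.length_append, List.length_cons] at hr ⊢
        omega
      rw [pvLines_append l t hl]
      by_cases hss : ['#','#'] <+: l
      · have h0 : ['#','#'] <+: l ++ '\n' :: t :=
          (pv_prefix_through _ l t (by decide)).mpr hss
        have hTBl : pvTakeBodyC (l :: pvLines t) = [] := by
          simp only [pvTakeBodyC]
          rw [if_pos (by rw [PySem.Chars.startswith_iff, pv_hh_toList]; exact hss)]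
        rw [pvSection, pv_find_nhh_zero _ h0, if_neg (by omega), hTBl, PySem.Chars.join_nil]
        simp
      · have hTBl : pvTakeBodyC (l :: pvLines t) = l :: pvTakeBodyC (pvLines t) := by
          simp only [pvTakeBodyC]
          rw [if_neg (by rw [PySem.Chars.startswith_iff, pv_hh_toList]; exact hss)]
        rw [hTBl]
        have hcons := pv_find_nhh_cons l t hl hss
        by_cases h2 : 0 ≤ PySem.Chars.find ('\n' :: t) ['\n','#','#']
        · rw [if_pos h2] at hcons
          have hkn : (((l.length : Int) + 1) + PySem.Chars.find ('\n' :: t) ['\n','#','#']).toNat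
              = l.length + 1 + (PySem.Chars.find ('\n' :: t) ['\n','#','#']).toNat := by omega
          rw [pvSection, hcons, if_neg (by omega), hkn]
          have htake : l.length + 1 + (PySem.Chars.find ('\n' :: t) ['\n','#','#']).toNat - 1
              = l.length + (PySem.Chars.find ('\n' :: t) ['\n','#','#']).toNat := by omega
          rw [htake, List.take_length_add_append]
          by_cases hk0 : (PySem.Chars.find ('\n' :: t) ['\n','#','#']).toNat = 0
          · have hfind0 : PySem.Chars.find ('\n' :: t) ['\n','#','#'] = 0 := by omega
            have hp0 := (PySem.Chars.find_spec h2).1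
            rw [hfind0] at hp0
            simp only [Int.toNat_zero, List.drop_zero] at hp0
            have hsst : ['#','#'] <+: t := (List.cons_prefix_cons.mp hp0).2
            rw [hk0, List.take_zero, List.append_nil, pv_takebody_of_ss t hsst,
              PySem.Chars.join_singleton]
          · have hsst : ¬ ['#','#'] <+: t := by
              intro hp
              have := pv_find_nhh_zero t hp
              omega
            obtain ⟨a, L, hTB⟩ := pv_takebody_of_not_ss t hsst
            have hIH := ih t hlen
            rw [pvSection, if_neg (by omega)] at hIH
            have htk : List.take (PySem.Chars.find ('\n' :: t) ['\n','#','#']).toNat ('\n' :: t)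
                = '\n' :: List.take ((PySem.Chars.find ('\n' :: t) ['\n','#','#']).toNat - 1) t := by
              cases hm : (PySem.Chars.find ('\n' :: t) ['\n','#','#']).toNat with
              | zero => exact absurd hm hk0
              | succ m => simp
            rw [htk, hIH, hTB, PySem.Chars.join_cons_cons]
            simp
        · rw [if_neg h2] at hcons
          have hin : PySem.Chars.find ('\n' :: t) ['\n','#','#'] = -1 := by
            have := PySem.Chars.neg_one_le_find ('\n' :: t) ['\n','#','#']
            omega
          have hsst : ¬ ['#','#'] <+: t := by
            intro hp
            have := pv_find_nhh_zero t hp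
            omega
          obtain ⟨a, L, hTB⟩ := pv_takebody_of_not_ss t hsst
          have hIH := ih t hlen
          rw [pvSection, if_pos hin] at hIH
          have hJ : PySem.Chars.join ['\n'] (pvTakeBodyC (pvLines t)) = t := hIH.symm
          rw [pvSection, hcons, if_pos rfl, hTB, PySem.Chars.join_cons_cons, ← hTB, hJ]
          simp


-- ---------- A-side loop characterisation (String level) ----------

-- first index whose line contains the header, if any
def pvFindHeader : List String → Option Nat
  | [] => none
  | line :: rest =>
    if PySem.Str.isIn "## Pending Tasks" line then some 0
    else (pvFindHeader rest).map (· + 1)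

-- the section body: lines up to (excluding) the next "##" line
def pvTakeBody : List String → List String
  | [] => []
  | line :: rest =>
    if PySem.Str.startswith line "##" then [] else line :: pvTakeBody rest

-- B's strip/filter/map pipeline over the body equals one flatMap of pvLineTasks
theorem pv_pipeline_eq (body : List String) :
    ((((body.map PySem.Str.strip).filter (fun s => PySem.Str.startswith s "-")).map
        (fun s => PySem.Str.strip (pvLstripDash s))).filter
          (fun t => !(t == "") && !(PySem.Str.isIn "No pending tasks" t))).map
        (fun t => PySem.Str.slice t none (some 80))
      = body.flatMap pvLineTasks := by
  induction body with
  | nil => rfl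
  | cons l rest ih =>
    simp only [List.map_cons, List.filter_cons, List.flatMap_cons, pvLineTasks]
    by_cases h1 : PySem.Str.startswith (PySem.Str.strip l) "-" = true
    · rw [if_pos h1, if_pos h1, List.map_cons, List.filter_cons]
      by_cases h2 : (!(PySem.Str.strip (pvLstripDash (PySem.Str.strip l)) == "") &&
          !(PySem.Str.isIn "No pending tasks" (PySem.Str.strip (pvLstripDash (PySem.Str.strip l))))) = true
      · rw [if_pos h2, if_pos h2, List.map_cons, ih]; rfl
      · rw [if_neg h2, if_neg h2, ih]; rfl
    · rw [if_neg h1, if_neg h1, ih]; rfl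

-- A's loop inside the section (no header line remains) collects pvLineTasks up to the break
theorem pv_aloop_section (lines : List String) (acc : List String)
    (h : ∀ l ∈ lines, PySem.Str.isIn "## Pending Tasks" l = false) :
    pvALoop lines true acc = acc ++ (pvTakeBody lines).flatMap pvLineTasks := by
  induction lines generalizing acc with
  | nil => simp [pvALoop, pvTakeBody]
  | cons l rest ih =>
    have hl : PySem.Str.isIn "## Pending Tasks" l = false := h l (by simp)
    have hrest : ∀ x ∈ rest, PySem.Str.isIn "## Pending Tasks" x = false :=
      fun x hx => h x (by simp [hx])
    simp only [pvALoop, pvTakeBody]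
    rw [if_neg (by simp only [hl, Bool.false_eq_true]; exact not_false), if_pos trivial]
    by_cases hb : PySem.Str.startswith l "##" = true
    · rw [if_pos hb, if_pos hb]; simp
    · rw [if_neg hb, if_neg hb, List.flatMap_cons]
      simp only [pvLineTasks]
      by_cases h1 : PySem.Str.startswith (PySem.Str.strip l) "-" = true
      · rw [if_pos h1, if_pos h1]
        by_cases h2 : (!(PySem.Str.strip (pvLstripDash (PySem.Str.strip l)) == "") &&
            !(PySem.Str.isIn "No pending tasks" (PySem.Str.strip (pvLstripDash (PySem.Str.strip l))))) = true
        · rw [if_pos h2, if_pos h2, ih _ hrest, List.append_assoc]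
        · rw [if_neg h2, if_neg h2, ih _ hrest]; rfl
      · rw [if_neg h1, if_neg h1, ih _ hrest]; rfl

-- A's loop before the section: skip to just after the first header line (or finish)
theorem pv_aloop_prefix (lines : List String) (acc : List String) :
    pvALoop lines false acc =
      match pvFindHeader lines with
      | none => acc
      | some i => pvALoop (lines.drop (i + 1)) true acc := by
  induction lines with
  | nil => simp [pvALoop, pvFindHeader]
  | cons l rest ih =>
    simp only [pvALoop, pvFindHeader]
    by_cases hl : PySem.Str.isIn "## Pending Tasks" l = true
    · rw [if_pos hl, if_pos hl]
      rfl
    · rw [if_neg hl, if_neg hl, if_neg (show ¬(false = true) by simp), ih]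
      cases hf : pvFindHeader rest with
      | none => rfl
      | some j => simp only [Option.map_some, List.drop_succ_cons]

-- after the (unique) header line nothing contains the header again
theorem pv_no_header_after (lines : List String) (i : Nat)
    (hf : pvFindHeader lines = some i)
    (hc : lines.countP (fun l => PySem.Str.isIn "## Pending Tasks" l) ≤ 1) :
    ∀ l ∈ lines.drop (i + 1), PySem.Str.isIn "## Pending Tasks" l = false := by
  induction lines generalizing i with
  | nil => simp [pvFindHeader] at hf
  | cons l rest ih =>
    by_cases hl : PySem.Str.isIn "## Pending Tasks" l = true
    · rw [pvFindHeader.eq_def] at hf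
      simp only [hl, if_pos, Option.some.injEq] at hf
      subst hf
      simp only [List.countP_cons, hl, if_pos] at hc
      have hz : rest.countP (fun x => PySem.Str.isIn "## Pending Tasks" x) = 0 := by omega
      intro x hx
      have hx' : x ∈ rest := by simpa using hx
      have := List.countP_eq_zero.mp hz x hx'
      simpa using this
    · rw [pvFindHeader.eq_def] at hf
      simp only [hl, if_false, Bool.false_eq_true] at hf
      cases hfr : pvFindHeader rest with
      | none => simp [hfr] at hf
      | some j =>
        simp only [hfr, Option.map_some, Option.some.injEq] at hf
        subst hf
        have hc' : rest.countP (fun x => PySem.Str.isIn "## Pending Tasks" x) ≤ 1 := by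
          simp only [List.countP_cons] at hc
          simp only [hl] at hc
          omega
        intro x hx
        exact ih j hfr hc' x (by simpa using hx)

-- ---------- String-level ↔ char-level bridges ----------

theorem pvFindHeader_map (cls : List (List Char)) :
    pvFindHeader (cls.map String.ofList) = pvFindHeaderC cls := by
  induction cls with
  | nil => rfl
  | cons l rest ih =>
    simp only [List.map_cons, pvFindHeader, pvFindHeaderC, PySem.Str.isIn_eq,
      String.toList_ofList, ih]

theorem pvTakeBody_map (cls : List (List Char)) :
    pvTakeBody (cls.map String.ofList) = (pvTakeBodyC cls).map String.ofList := by
  induction cls with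
  | nil => rfl
  | cons l rest ih =>
    simp only [List.map_cons, pvTakeBody, pvTakeBodyC, PySem.Str.startswith_eq,
      String.toList_ofList]
    by_cases h : PySem.Chars.startswith l "##".toList = true
    · rw [if_pos h, if_pos h]; rfl
    · rw [if_neg h, if_neg h, ih]; rfl

theorem pvTakeBodyC_subset (L : List (List Char)) : ∀ x ∈ pvTakeBodyC L, x ∈ L := by
  induction L with
  | nil => simp [pvTakeBodyC]
  | cons l rest ih =>
    simp only [pvTakeBodyC]
    split
    · simp
    · intro x hx
      rcases List.mem_cons.mp hx with hx | hx
      · simp [hx]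
      · exact List.mem_cons.mpr (Or.inr (ih x hx))

-- ---------- header location, line-wise vs raw-string ----------

theorem pv_infix_lines (n : Nat) (sub : List Char) (h0 : '\n' ∉ sub) (hne : sub ≠ []) :
    ∀ cs : List Char, cs.length ≤ n →
      (sub <:+: cs ↔ ∃ l ∈ pvLines cs, sub <:+: l) := by
  induction n with
  | zero =>
    intro cs hcs
    have : cs = [] := List.length_eq_zero_iff.mp (Nat.le_zero.mp hcs)
    subst this
    simp only [pvLines]
    constructor
    · intro hh; exact absurd (List.infix_nil.mp hh) hne
    · rintro ⟨l, hl, hh⟩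
      rcases List.mem_singleton.mp hl with rfl
      exact absurd (List.infix_nil.mp hh) hne
  | succ n ih =>
    intro cs hcs
    rcases pv_decomp cs with hn | ⟨l, r, rfl, hl⟩
    · rw [pvLines_no_newline cs hn]
      simp
    · rw [pvLines_append l r hl, pv_infix_split sub l r h0 hne]
      have hlen : r.length ≤ n := by
        simp only [List.length_append, List.length_cons] at hcs
        omega
      rw [ih r hlen]
      constructor
      · rintro (hh | ⟨x, hx, hh⟩)
        · exact ⟨l, by simp, hh⟩
        · exact ⟨x, by simp [hx], hh⟩
      · rintro ⟨x, hx, hh⟩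
        rcases List.mem_cons.mp hx with rfl | hx
        · exact Or.inl hh
        · exact Or.inr ⟨x, hx, hh⟩

theorem pvFindHeaderC_none_iff (L : List (List Char)) :
    pvFindHeaderC L = none ↔ ∀ l ∈ L, PySem.Chars.isIn "## Pending Tasks".toList l = false := by
  induction L with
  | nil => simp [pvFindHeaderC]
  | cons l rest ih =>
    simp only [pvFindHeaderC]
    by_cases h : PySem.Chars.isIn "## Pending Tasks".toList l = true
    · rw [if_pos h]
      constructor
      · intro hh; cases hh
      · intro hh
        have hf := hh l (by simp)
        rw [hf] at h
        cases h
    · rw [if_neg h]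
      simp only [Option.map_eq_none_iff, ih]
      constructor
      · intro hh x hx
        rcases List.mem_cons.mp hx with rfl | hx
        · simpa using h
        · exact hh x hx
      · intro hh x hx
        exact hh x (by simp [hx])

theorem pv_headerC_none_iff_find (cs : List Char) :
    pvFindHeaderC (pvLines cs) = none ↔
      PySem.Chars.find cs "## Pending Tasks".toList = -1 := by
  rw [pvFindHeaderC_none_iff, PySem.Chars.find_eq_neg_one_iff,
    pv_infix_lines cs.length "## Pending Tasks".toList (by decide) (by decide) cs le_rfl]
  constructor
  · rintro h ⟨l, hl, hinf⟩
    exact (PySem.Chars.isIn_eq_false_iff _ _).mp (h l hl) hinf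
  · intro h l hl
    rw [PySem.Chars.isIn_eq_false_iff]
    exact fun hinf => h ⟨l, hl, hinf⟩


-- ---------- B as a function of the characters ----------

def pvBTasks (cs : List Char) : Int × List String :=
  let i := PySem.Chars.find cs "## Pending Tasks".toList
  if i = -1 then (0, [])
  else
    let rest := cs.drop (i + 16).toNat
    let nl := PySem.Chars.find rest ['\n']
    if nl = -1 then (0, [])
    else
      let rest2 := rest.drop nl.toNat
      let k := PySem.Chars.find rest2 ['\n','#','#']
      let sec := if k = -1 then rest2.drop 1 else List.take (k.toNat - 1) (rest2.drop 1)
      let stripped := ((pvLines sec).map String.ofList).map PySem.Str.strip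
      let dashed := (stripped.filter (fun s => PySem.Str.startswith s "-")).map
        (fun s => PySem.Str.strip (pvLstripDash s))
      let tasks := (dashed.filter
          (fun t => !(t == "") && !(PySem.Str.isIn "No pending tasks" t))).map
        (fun t => PySem.Str.slice t none (some 80))
      ((tasks.length : Int), tasks)

theorem pv_alt_eq (content : String) :
    check_pending_tasks_alt content = pvBTasks content.toList := by
  unfold check_pending_tasks_alt pvBTasks
  have hlen16 : PySem.Str.len "## Pending Tasks" = (16 : Int) := by decide
  have hnltl : "\n".toList = ['\n'] := by decide
  have hnhhtl : "\n##".toList = ['\n','#','#'] := by decide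
  simp only [PySem.Str.find_eq, pv_lines_eq, apply_ite String.toList,
    PySem.Str.toList_slice, PySem.Chars.slice_eq_listSlice,
    hnltl, hnhhtl, hlen16, beq_iff_eq]
  by_cases h1 : PySem.Chars.find content.toList "## Pending Tasks".toList = -1
  · rw [if_pos h1, if_pos h1]
  · rw [if_neg h1, if_neg h1]
    have h1n : 0 ≤ PySem.Chars.find content.toList "## Pending Tasks".toList := by
      have := PySem.Chars.neg_one_le_find content.toList "## Pending Tasks".toList
      omega
    rw [PySem.List.slice_from content.toList
      (show (0:Int) ≤ PySem.Chars.find content.toList "## Pending Tasks".toList + 16 by omega)]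
    set R := content.toList.drop
      (PySem.Chars.find content.toList "## Pending Tasks".toList + 16).toNat with hR
    by_cases h2 : PySem.Chars.find R ['\n'] = -1
    · rw [if_pos h2, if_pos h2]
    · rw [if_neg h2, if_neg h2]
      have h2n : 0 ≤ PySem.Chars.find R ['\n'] := by
        have := PySem.Chars.neg_one_le_find R ['\n']
        omega
      rw [PySem.List.slice_from R h2n]
      set R2 := R.drop (PySem.Chars.find R ['\n']).toNat with hR2
      by_cases h3 : PySem.Chars.find R2 ['\n','#','#'] = -1
      · rw [if_pos h3, if_pos h3, PySem.List.slice_from R2 (by omega)]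
        norm_num
      · rw [if_neg h3, if_neg h3]
        have h3n : 0 ≤ PySem.Chars.find R2 ['\n','#','#'] := by
          have := PySem.Chars.neg_one_le_find R2 ['\n','#','#']
          omega
        have hcast : PySem.Chars.find R2 ['\n','#','#']
            = ((PySem.Chars.find R2 ['\n','#','#']).toNat : Int) := by omega
        rw [hcast]
        have h1cast : (1 : Int) = ((1 : Nat) : Int) := by norm_num
        rw [h1cast, PySem.List.slice_natCast]
        norm_num
        rw [max_eq_left h3n]
        exact ⟨rfl, rfl⟩


-- ---------- B computes the header-line body ----------

def pvBodySpec (cs : List Char) : Int × List String :=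
  match pvFindHeaderC (pvLines cs) with
  | none => (0, [])
  | some j =>
    let tasks := ((pvTakeBodyC ((pvLines cs).drop (j+1))).map String.ofList).flatMap pvLineTasks
    ((tasks.length : Int), tasks)

theorem pv_btasks_spec (n : Nat) : ∀ cs : List Char, cs.length ≤ n →
    pvBTasks cs = pvBodySpec cs := by
  induction n with
  | zero =>
    intro cs hcs
    have : cs = [] := List.length_eq_zero_iff.mp (Nat.le_zero.mp hcs)
    subst this
    decide
  | succ n ih =>
    intro cs hcs
    rcases pv_decomp cs with hn | ⟨l, r, rfl, hl⟩
    · by_cases hIn : PySem.Chars.isIn "## Pending Tasks".toList cs = true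
      · have hinf := (PySem.Chars.isIn_iff_infix _ _).mp hIn
        have h1n : 0 ≤ PySem.Chars.find cs "## Pending Tasks".toList :=
          (PySem.Chars.find_nonneg_iff _ _).mpr hinf
        have hnlrest : '\n' ∉ cs.drop
            (PySem.Chars.find cs "## Pending Tasks".toList + 16).toNat :=
          fun hm => hn (List.mem_of_mem_drop hm)
        simp only [pvBTasks, pvBodySpec, pvLines_no_newline cs hn, pvFindHeaderC,
          if_pos hIn]
        rw [if_neg (by omega), if_pos (pv_find_nl_none _ hnlrest)]
        simp [pvTakeBodyC]
      · have hf : PySem.Chars.find cs "## Pending Tasks".toList = -1 := by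
          rw [PySem.Chars.find_eq_neg_one_iff]
          exact (PySem.Chars.isIn_eq_false_iff _ _).mp (by simpa using hIn)
        simp only [pvBTasks, pvBodySpec, pvLines_no_newline cs hn, pvFindHeaderC]
        rw [if_pos hf, if_neg hIn]
        simp
    · have hlen : r.length ≤ n := by
        simp only [List.length_append, List.length_cons] at hcs
        omega
      by_cases hIn : PySem.Chars.isIn "## Pending Tasks".toList l = true
      · -- header in the first line
        have hinfl := (PySem.Chars.isIn_iff_infix _ _).mp hIn
        have hln : 0 ≤ PySem.Chars.find l "## Pending Tasks".toList :=
          (PySem.Chars.find_nonneg_iff _ _).mpr hinfl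
        have hfind := pv_find_append "## Pending Tasks".toList l r (by decide) (by decide)
        rw [if_pos hln] at hfind
        have hp := (PySem.Chars.find_spec hln).1
        have hple := List.IsPrefix.length_le hp
        have hHL16 : ("## Pending Tasks".toList).length = 16 := by decide
        rw [hHL16] at hple
        have hle : (PySem.Chars.find l "## Pending Tasks".toList).toNat + 16 ≤ l.length := by
          simp only [List.length_drop] at hple
          omega
        have htoNat : (PySem.Chars.find (l ++ '\n' :: r) "## Pending Tasks".toList + 16).toNat
            = (PySem.Chars.find l "## Pending Tasks".toList).toNat + 16 := by
          rw [hfind]; omega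
        simp only [pvBTasks]
        rw [if_neg (by rw [hfind]; omega), htoNat,
          List.drop_append_of_le_length hle]
        set d := l.drop ((PySem.Chars.find l "## Pending Tasks".toList).toNat + 16) with hd
        have hdnl : '\n' ∉ d := fun hm => hl (List.mem_of_mem_drop hm)
        rw [pv_find_nl d r hdnl, if_neg (by omega)]
        have hdrop : (d ++ '\n' :: r).drop ((d.length : Int)).toNat = '\n' :: r := by
          rw [Int.toNat_natCast, List.drop_left]
        rw [hdrop]
        have hsec : (if PySem.Chars.find ('\n' :: r) ['\n','#','#'] = -1
              then ('\n' :: r).drop 1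
              else List.take ((PySem.Chars.find ('\n' :: r) ['\n','#','#']).toNat - 1)
                (('\n' :: r).drop 1))
            = pvSection r := by
          rw [pvSection]
          simp
        rw [hsec, pv_section_eq r.length r le_rfl]
        simp only [pvBodySpec, pvLines_append l r hl, pvFindHeaderC, if_pos hIn,
          List.drop_succ_cons, List.drop_zero]
        cases hTB : pvTakeBodyC (pvLines r) with
        | nil =>
          rw [PySem.Chars.join_nil]
          decide
        | cons a L =>
          have hnonl : ∀ x ∈ a :: L, '\n' ∉ x := by
            intro x hx
            exact pvLines_no_nl r x (pvTakeBodyC_subset (pvLines r) x (hTB ▸ hx))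
          rw [pv_join_lines (a :: L) hnonl (by simp)]
          rw [pv_pipeline_eq ((a :: L).map String.ofList)]
      · -- first line is not the header line
        have hfl : PySem.Chars.find l "## Pending Tasks".toList = -1 := by
          rw [PySem.Chars.find_eq_neg_one_iff]
          exact (PySem.Chars.isIn_eq_false_iff _ _).mp (by simpa using hIn)
        have hfind := pv_find_append "## Pending Tasks".toList l r (by decide) (by decide)
        rw [if_neg (by omega)] at hfind
        have hBody : pvBodySpec (l ++ '\n' :: r) =
            match pvFindHeaderC (pvLines r) with
            | none => (0, [])
            | some j =>
              let tasks := ((pvTakeBodyC ((pvLines r).drop (j+1))).map String.ofList).flatMap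
                pvLineTasks
              ((tasks.length : Int), tasks) := by
          simp only [pvBodySpec, pvLines_append l r hl, pvFindHeaderC, if_neg hIn]
          cases hfh : pvFindHeaderC (pvLines r) with
          | none => simp
          | some j => simp [List.drop_succ_cons]
        by_cases hfr : 0 ≤ PySem.Chars.find r "## Pending Tasks".toList
        · rw [if_pos hfr] at hfind
          have hne : ¬ PySem.Chars.find (l ++ '\n' :: r) "## Pending Tasks".toList = -1 := by
            rw [hfind]; omega
          have htoNat : (PySem.Chars.find (l ++ '\n' :: r) "## Pending Tasks".toList + 16).toNat
              = l.length + (1 + ((PySem.Chars.find r "## Pending Tasks".toList + 16).toNat)) := by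
            rw [hfind]; omega
          have hdrop : (l ++ '\n' :: r).drop
              (l.length + (1 + (PySem.Chars.find r "## Pending Tasks".toList + 16).toNat))
              = r.drop (PySem.Chars.find r "## Pending Tasks".toList + 16).toNat := by
            rw [List.drop_length_add_append, Nat.add_comm]
            simp
          have hLHS : pvBTasks (l ++ '\n' :: r) = pvBTasks r := by
            simp only [pvBTasks]
            rw [if_neg hne, htoNat, hdrop,
              if_neg (show ¬ PySem.Chars.find r "## Pending Tasks".toList = -1 by omega)]
          rw [hLHS, ih r hlen, hBody]
          rfl
        · rw [if_neg hfr] at hfind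
          have hfrn : PySem.Chars.find r "## Pending Tasks".toList = -1 := by
            have := PySem.Chars.neg_one_le_find r "## Pending Tasks".toList
            omega
          have hnone : pvFindHeaderC (pvLines r) = none :=
            (pv_headerC_none_iff_find r).mpr hfrn
          simp only [pvBTasks]
          rw [if_pos hfind, hBody, hnone]

-- ===== VERDICT (by name: the statement is the Claim_ definition above) =====
theorem check_pending_tasks_spec : Claim_equal_check_pending_tasks := by
  intro content _ hpre
  unfold Pre_check_pending_tasks at hpre
  unfold Spec_check_pending_tasks check_pending_tasks
  rw [pv_alt_eq, pv_btasks_spec content.toList.length content.toList le_rfl]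
  rw [pv_lines_eq content] at hpre ⊢
  rw [pv_aloop_prefix]
  unfold pvBodySpec
  cases hf : pvFindHeaderC (pvLines content.toList) with
  | none =>
    rw [pvFindHeader_map, hf]
    simp
  | some j =>
    rw [pvFindHeader_map, hf]
    dsimp only
    rw [pv_aloop_section _ []
      (pv_no_header_after _ j (by rw [pvFindHeader_map, hf]) hpre)]
    rw [← List.map_drop, pvTakeBody_map]
    simp
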